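-- pv_equiv track=rewrite | github.com/YT0602/Coding-Test | 연습장/swea baby-jin.py | is_run
-- ===== SOURCE A (Python) =====
-- def is_run(list):
--     cnt = 0
--     for i in list:
--         # 카드가 3장 연속 있다면 True
--         if i != 0:
--             cnt += 1
--             if cnt == 3:
--                 return True
--         else:
--             cnt = 0
-- ===== SOURCE B (Python) =====
-- def is_run(list):
--     if any(a != 0 and b != 0 and c != 0 for a, b, c in zip(list, list[1:], list[2:])):
--         return True
-- ===== Notes on version B (the rewrite author's own statement) =====
-- stated objective: idiomatic
-- what changed: Replaces the running consecutive-nonzero counter (reset on zeros, early return at 3) with a stateless any() over sliding windows of three built by zipping the list with its two shifted copies.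
import Mathlib
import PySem

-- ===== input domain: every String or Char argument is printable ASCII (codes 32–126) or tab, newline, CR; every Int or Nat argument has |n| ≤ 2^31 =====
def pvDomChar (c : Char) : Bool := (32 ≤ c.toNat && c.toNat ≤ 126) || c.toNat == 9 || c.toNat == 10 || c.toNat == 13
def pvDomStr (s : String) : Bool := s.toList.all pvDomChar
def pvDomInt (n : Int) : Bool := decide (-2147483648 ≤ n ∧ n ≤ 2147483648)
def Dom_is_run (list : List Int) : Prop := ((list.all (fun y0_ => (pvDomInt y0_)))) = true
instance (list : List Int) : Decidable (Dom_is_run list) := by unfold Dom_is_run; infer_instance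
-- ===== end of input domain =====

-- B replaces A's running consecutive-nonzero counter with a stateless any() over
-- sliding windows of three obtained by zipping the list with its two shifted copies (objective: idiomatic).

-- ===== PORT A =====
-- the for-loop with the counter `cnt`, early `return True`, implicit `return None`
def isRunLoopA : List Int → Int → Option Bool
  | [], _ => none
  | i :: rest, cnt =>
    if i ≠ 0 then
      if cnt + 1 = 3 then some true
      else isRunLoopA rest (cnt + 1)
    else isRunLoopA rest 0

def is_run (list : List Int) : Option Bool := isRunLoopA list 0

-- ===== PORT B =====
-- zip(list, list[1:], list[2:]) as nested pairs, then any, then `return True` / implicit None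
def is_run_alt (list : List Int) : Option Bool :=
  if ((list.zip (PySem.List.slice list (some 1) none)).zip
        (PySem.List.slice list (some 2) none)).any
      (fun p => decide (p.1.1 ≠ 0) && decide (p.1.2 ≠ 0) && decide (p.2 ≠ 0))
  then some true else none

-- ===== PRECONDITION & SPEC =====
def Spec_is_run (list : List Int) (out : Option Bool) : Prop := out = is_run_alt list
instance (list : List Int) (out : Option Bool) : Decidable (Spec_is_run list out) := by unfold Spec_is_run; infer_instance

-- ===== CLAIM (what is proved, stated in full; the proofs are below) =====
def Claim_equal_is_run : Prop := ∀ (list : List Int), Dom_is_run list → Spec_is_run list (is_run list)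

-- ===== LEMMAS AND PROOFS =====

-- sliding-window predicate: some window of three consecutive elements is all nonzero
def win : List Int → Bool
  | a :: b :: c :: t => (decide (a ≠ 0) && decide (b ≠ 0) && decide (c ≠ 0)) || win (b :: c :: t)
  | _ => false

theorem win_head_irrel (x : Int) (hx : x ≠ 0) (t : List Int) : win (x :: t) = win (1 :: t) := by
  match t with
  | [] => rfl
  | [b] => rfl
  | b :: c :: r => simp [win, hx]

theorem win_head_irrel1 (x : Int) (hx : x ≠ 0) (t : List Int) :
    win (1 :: x :: t) = win (1 :: 1 :: t) := by
  match t with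
  | [] => rfl
  | b :: r => simp [win, hx, win_head_irrel x hx (b :: r)]

theorem zipAny_eq_win (l : List Int) :
    ((l.zip (l.drop 1)).zip (l.drop 2)).any
      (fun p => decide (p.1.1 ≠ 0) && decide (p.1.2 ≠ 0) && decide (p.2 ≠ 0)) = win l := by
  induction l using win.induct with
  | case1 a b c t ih =>
    simp only [List.drop, List.zip_cons_cons, List.any_cons, win]
    rw [← ih]
    rfl
  | case2 l h =>
    match l, h with
    | [], _ => rfl
    | [a], _ => rfl
    | [a, b], _ => rfl
    | a :: b :: c :: t, h => exact (h a b c t rfl).elim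

theorem loopA_eq_win (l : List Int) (cnt : Nat) (hc : cnt ≤ 2) :
    isRunLoopA l (cnt : Int) = (if win (List.replicate cnt 1 ++ l) then some true else none) := by
  induction l generalizing cnt with
  | nil =>
    interval_cases cnt <;> simp [isRunLoopA, win, List.replicate]
  | cons x t ih =>
    by_cases hx : x = 0
    · subst hx
      have h0 : isRunLoopA (0 :: t) (cnt : Int) = isRunLoopA t 0 := by
        simp [isRunLoopA]
      have h1 := ih 0 (by omega)
      have hwin : win (List.replicate cnt 1 ++ 0 :: t) = win t := by
        interval_cases cnt <;>
          · match t with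
            | [] => rfl
            | [b] => rfl
            | b :: c :: r => simp [List.replicate, win]
      rw [h0, hwin]
      simpa using h1
    · rcases Nat.lt_or_ge cnt 2 with hlt | hge
      · have hstep : isRunLoopA (x :: t) (cnt : Int) = isRunLoopA t ((cnt + 1 : Nat) : Int) := by
          simp [isRunLoopA, hx]
          omega
        have h1 := ih (cnt + 1) (by omega)
        rw [hstep, h1]
        have : win (List.replicate cnt 1 ++ x :: t) = win (List.replicate (cnt + 1) 1 ++ t) := by
          interval_cases cnt
          · simpa [List.replicate] using win_head_irrel x hx t
          · simpa [List.replicate] using win_head_irrel1 x hx t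
        rw [this]
      · have hc2 : cnt = 2 := by omega
        subst hc2
        have hA : isRunLoopA (x :: t) ((2 : Nat) : Int) = some true := by
          simp [isRunLoopA, hx]
        have hw : win (List.replicate 2 1 ++ x :: t) = true := by
          simp [List.replicate, win, hx]
        rw [hA, hw]
        rfl

-- ===== VERDICT (by name: the statement is the Claim_ definition above) =====
theorem is_run_spec : Claim_equal_is_run := by
  intro l _
  unfold Spec_is_run is_run is_run_alt
  have hs1 : PySem.List.slice l (some 1) none = l.drop 1 := by simp [pysem]
  have hs2 : PySem.List.slice l (some 2) none = l.drop 2 := by simp [pysem]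
  rw [hs1, hs2, zipAny_eq_win]
  simpa [List.replicate] using loopA_eq_win l 0 (by omega)
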